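-- pv_equiv track=rewrite | github.com/KimGJHC/Data-Structure-Algorithem-learning | IntensiveTagRush/Array/maxNumberOfPointsWithCost.py | maxPoints_v2
-- ===== SOURCE A (Python) =====
-- from typing import List
--
-- def maxPoints_v2(points: List[List[int]]) -> int:
--     ROW, COL = len(points), len(points[0])
--     pre = curr = points[0]
--
--     for row in range(1, ROW):
--         curr = [0] * COL
--         left_max, right_max = [pre[0]], [pre[-1]]
--         for i in range(1, COL):
--             left_max.append(max(left_max[-1] - 1, pre[i]))
--             right_max.append(max(right_max[-1] - 1, pre[COL - i - 1]))
--         right_max.reverse()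
--
--         for col in range(COL):
--             curr[col] = max(left_max[col], right_max[col]) + points[row][col]
--
--         pre = curr[:]
--
--     return max(curr)
-- ===== SOURCE B (Python) =====
-- from typing import List
--
-- def maxPoints_v2(points: List[List[int]]) -> int:
--     best = points[0][:]
--     n = len(best)
--     for row in points[1:]:
--         # doubling relaxation: after shifts d = 1, 2, 4, ... the value
--         # best[c] = max(pre[k] - |k - c|) since every offset is a signed
--         # sum of distinct powers of two of total weight |offset|
--         d = 1
--         while d < n:
--             dec = [b - d for b in best]
--             b2 = list(map(max, best[:n - d], dec[d:])) + best[n - d:]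
--             best = b2[:d] + list(map(max, b2[d:], dec[:n - d]))
--             d *= 2
--         best = [p + b for p, b in zip(row, best)]
--     return max(best)
-- ===== Notes on version B (the rewrite author's own statement) =====
-- stated objective: alternative
-- what changed: Replaces A's left/right decaying running-maxima sweeps by per-row doubling (binary-lifting) relaxation: for d = 1,2,4,... set best[c] = max(best[c], best[c-d]-d, best[c+d]-d); signed binary decompositions of the offset make every |k-c| move penalty exact, with no directional running-max arrays at all; O(ROW*COL*log COL) vs A's O(ROW*COL).
import Mathlib
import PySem

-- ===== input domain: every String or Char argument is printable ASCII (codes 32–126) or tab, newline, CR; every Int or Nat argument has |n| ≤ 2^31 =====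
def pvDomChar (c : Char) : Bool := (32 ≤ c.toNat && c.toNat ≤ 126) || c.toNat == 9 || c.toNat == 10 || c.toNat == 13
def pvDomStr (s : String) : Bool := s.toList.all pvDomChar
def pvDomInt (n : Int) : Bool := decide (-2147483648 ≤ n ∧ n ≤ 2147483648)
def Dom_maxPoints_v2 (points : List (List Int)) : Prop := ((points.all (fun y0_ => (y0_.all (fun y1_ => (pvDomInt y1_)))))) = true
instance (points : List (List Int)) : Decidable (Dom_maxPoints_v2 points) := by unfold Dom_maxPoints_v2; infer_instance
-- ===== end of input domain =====

-- B computes each row's |k-c|-penalised maximum by doubling (binary-lifting) relaxation with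
-- shifts d = 1,2,4,... instead of A's left/right decaying running-maxima sweeps: a different
-- algorithm of similar cost (O(ROW*COL*log COL) vs O(ROW*COL)), not claimed faster.

-- Python max(xs) on a list of ints (both sources call it); Pre_ keeps its argument nonempty.
def pyMax (l : List Int) : Int := (PySem.List.max? l (fun y => y)).getD 0

-- ===== PORT A =====
def maxPoints_v2 (points : List (List Int)) : Int :=
  let ROW : Int := points.length
  let COL : Int := (PySem.List.pyGetD points 0 []).length
  let curr : List Int :=
    (PySem.List.pyRange 1 ROW 1).foldl (fun pre row =>
      let lr := (PySem.List.pyRange 1 COL 1).foldl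
        (fun (p : List Int × List Int) i =>
          (p.1 ++ [max (PySem.List.pyGetD p.1 (-1) 0 - 1) (PySem.List.pyGetD pre i 0)],
           p.2 ++ [max (PySem.List.pyGetD p.2 (-1) 0 - 1) (PySem.List.pyGetD pre (COL - i - 1) 0)]))
        ([PySem.List.pyGetD pre 0 0], [PySem.List.pyGetD pre (-1) 0])
      (PySem.List.pyRange 0 COL 1).map (fun col =>
        max (PySem.List.pyGetD lr.1 col 0) (PySem.List.pyGetD lr.2.reverse col 0)
          + PySem.List.pyGetD (PySem.List.pyGetD points row []) col 0))
      (PySem.List.pyGetD points 0 [])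
  pyMax curr

-- ===== PORT B =====
-- one relaxation pass with shift d: best'[c] = max of best[c], best[c+d]-d (if c+d<n), best[c-d]-d (if c>=d)
def pvRelax (best : List Int) (d n : Nat) : List Int :=
  let dec := best.map (fun b => b - (d : Int))
  let b2 := List.zipWith max (best.take (n - d)) (dec.drop d) ++ best.drop (n - d)
  b2.take d ++ List.zipWith max (b2.drop d) (dec.take (n - d))

-- the 'while d < n: ... d *= 2' loop; d is represented as dm + 1 (d stays positive)
def pvLoop (best : List Int) (dm n : Nat) : List Int :=
  if dm + 1 < n then pvLoop (pvRelax best (dm + 1) n) (2 * dm + 1) n else best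
termination_by n - dm
decreasing_by omega

def maxPoints_v2_alt (points : List (List Int)) : Int :=
  let best0 := points.headI
  let n := best0.length
  let last := (points.drop 1).foldl (fun best rw =>
    List.zipWith (fun p b => p + b) rw (pvLoop best 0 n)) best0
  pyMax last

-- ===== PRECONDITION & SPEC =====
-- Exactly the inputs where the Python A returns: a nonempty grid whose first row is nonempty
-- and no later row shorter than the first; on all other inputs A raises (IndexError or ValueError).
def Pre_maxPoints_v2 (points : List (List Int)) : Prop :=
  points ≠ [] ∧ points.headI ≠ [] ∧ ∀ r ∈ points, points.headI.length ≤ r.length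
instance (points : List (List Int)) : Decidable (Pre_maxPoints_v2 points) := by
  unfold Pre_maxPoints_v2; infer_instance

def pvWitness_maxPoints_v2 : List (List Int) := [[1, 2, 3], [4, 0, 1]]

def Spec_maxPoints_v2 (points : List (List Int)) (out : Int) : Prop := out = maxPoints_v2_alt points
instance (points : List (List Int)) (out : Int) : Decidable (Spec_maxPoints_v2 points out) := by
  unfold Spec_maxPoints_v2; infer_instance

-- ===== CLAIM (what is proved, stated in full; the proofs are below) =====
def Claim_equal_maxPoints_v2 : Prop := ∀ (points : List (List Int)), Dom_maxPoints_v2 points → Pre_maxPoints_v2 points → Spec_maxPoints_v2 points (maxPoints_v2 points)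

-- ===== LEMMAS AND PROOFS =====

-- A's left_max recurrence as a function of the column index.
def pvLA (f : Nat → Int) : Nat → Int
  | 0 => f 0
  | i + 1 => max (pvLA f i - 1) (f (i + 1))

-- running maximum of a sequence (max over indices ≤ m)
def pvRM (h : Nat → Int) : Nat → Int
  | 0 => h 0
  | j + 1 => max (pvRM h j) (h (j + 1))

theorem le_pvRM (h : Nat → Int) {k m : Nat} (hk : k ≤ m) : h k ≤ pvRM h m := by
  induction m with
  | zero => interval_cases k; simp [pvRM]
  | succ m ih =>
    rcases Nat.lt_or_ge k (m + 1) with hlt | hge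
    · exact le_trans (ih (by omega)) (le_max_left _ _)
    · have : k = m + 1 := by omega
      subst this; exact le_max_right _ _

theorem pvRM_exists (h : Nat → Int) : ∀ m, ∃ k ≤ m, pvRM h m = h k := by
  intro m
  induction m with
  | zero => exact ⟨0, le_rfl, rfl⟩
  | succ m ih =>
    obtain ⟨k, hk, hEq⟩ := ih
    rcases max_cases (pvRM h m) (h (m + 1)) with ⟨h1, _⟩ | ⟨h1, _⟩
    · exact ⟨k, by omega, by rw [show pvRM h (m + 1) = max (pvRM h m) (h (m + 1)) from rfl, h1, hEq]⟩
    · exact ⟨m + 1, le_rfl, by simp [pvRM, h1]⟩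

-- A's decaying running max equals the prefix max of f k + k, shifted by the column.
theorem pvLA_eq_RM (f : Nat → Int) :
    ∀ c : Nat, pvLA f c = pvRM (fun k => f k + (k : Int)) c - (c : Int) := by
  intro c
  induction c with
  | zero => simp [pvLA, pvRM]
  | succ c ih =>
    simp only [pvLA, pvRM, ih]
    simp only [Int.max_def]
    split_ifs <;> push_cast <;> omega

-- the right-to-left analogue, through the reversed index n-1-j
theorem pvLA_right (pre : List Int) (n : Nat) :
    ∀ i : Nat, 1 ≤ n → i ≤ n - 1 →
    pvLA (fun j => pre.getD (n - 1 - j) 0) i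
      = pvRM (fun j => pre.getD (n - 1 - j) 0 - ((n - 1 - j : Nat) : Int)) i
          + ((n - 1 - i : Nat) : Int) := by
  intro i
  induction i with
  | zero => intro _ _; simp only [pvLA, pvRM]; ring
  | succ i ih =>
    intro h1 hi
    simp only [pvLA, pvRM, ih h1 (by omega)]
    simp only [Int.max_def]
    split_ifs <;> omega

-- THE key fact: the direct scan max over all k of f k - |k-c| splits into prefix and suffix parts.
theorem pvMaxSplit (f : Nat → Int) (n c : Nat) (h1 : 1 ≤ n) (hc : c < n) :
    pvRM (fun k => f k - |(k : Int) - (c : Int)|) (n - 1)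
      = max (pvRM (fun k => f k + (k : Int)) c - (c : Int))
            (pvRM (fun j => f (n - 1 - j) - ((n - 1 - j : Nat) : Int)) (n - 1 - c) + (c : Int)) := by
  apply le_antisymm
  · obtain ⟨k, hk, hEq⟩ := pvRM_exists (fun k => f k - |(k : Int) - (c : Int)|) (n - 1)
    rw [hEq]
    by_cases hkc : k ≤ c
    · have habs : |(k : Int) - (c : Int)| = (c : Int) - (k : Int) := by
        rw [abs_of_nonpos (by omega)]; ring
      have hle := le_pvRM (fun k => f k + (k : Int)) hkc
      refine le_trans ?_ (le_max_left _ _)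
      simp only at hle ⊢
      omega
    · push Not at hkc
      have habs : |(k : Int) - (c : Int)| = (k : Int) - (c : Int) := by
        rw [abs_of_nonneg (by omega)]
      have hj : n - 1 - k ≤ n - 1 - c := by omega
      have hle := le_pvRM (fun j => f (n - 1 - j) - ((n - 1 - j : Nat) : Int)) hj
      simp only at hle
      have hk' : n - 1 - (n - 1 - k) = k := by omega
      rw [hk'] at hle
      refine le_trans ?_ (le_max_right _ _)
      omega
  · apply max_le
    · obtain ⟨k, hk, hEq⟩ := pvRM_exists (fun k => f k + (k : Int)) c
      have habs : |(k : Int) - (c : Int)| = (c : Int) - (k : Int) := by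
        rw [abs_of_nonpos (by omega)]; ring
      have hle := le_pvRM (fun k => f k - |(k : Int) - (c : Int)|) (show k ≤ n - 1 by omega)
      simp only at hle hEq ⊢
      omega
    · obtain ⟨j, hj, hEq⟩ := pvRM_exists (fun j => f (n - 1 - j) - ((n - 1 - j : Nat) : Int)) (n - 1 - c)
      have hic : c ≤ n - 1 - j := by omega
      have habs : |((n - 1 - j : Nat) : Int) - (c : Int)| = ((n - 1 - j : Nat) : Int) - (c : Int) := by
        rw [abs_of_nonneg (by omega)]
      have hle := le_pvRM (fun k => f k - |(k : Int) - (c : Int)|) (show n - 1 - j ≤ n - 1 by omega)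
      simp only at hle hEq ⊢
      omega

-- last element of a mapped range, fetched Python-style with index -1
theorem pyGetD_map_range_neg_one (h : Nat → Int) (m : Nat) (d : Int) :
    PySem.List.pyGetD ((List.range (m + 1)).map h) (-1) d = h m := by
  rw [List.range_succ, List.map_append]
  exact PySem.List.pyGetD_neg_one_append_singleton _ _ _

theorem getD_map_range_of_lt (h : Nat → Int) {n c : Nat} (hc : c < n) (d : Int) :
    ((List.range n).map h).getD c d = h c := by
  rw [List.getD_eq_getElem?_getD]
  simp [hc]

theorem getD_reverse_map_range (h : Nat → Int) {n c : Nat} (hc : c < n) (d : Int) :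
    ((List.range n).map h).reverse.getD c d = h (n - 1 - c) := by
  rw [List.getD_eq_getElem?_getD, List.getElem?_eq_getElem (by simpa)]
  simp [List.getElem_reverse]

-- A's inner left/right loop builds exactly the maps of pvLA
theorem pvInner (pre : List Int) (n : Nat) (hn : pre.length = n) (h1 : 1 ≤ n) :
    ∀ m : Nat, m ≤ n - 1 →
    (PySem.List.pyRange 1 (1 + (m : Int)) 1).foldl
      (fun (p : List Int × List Int) i =>
          (p.1 ++ [max (PySem.List.pyGetD p.1 (-1) 0 - 1) (PySem.List.pyGetD pre i 0)],
           p.2 ++ [max (PySem.List.pyGetD p.2 (-1) 0 - 1) (PySem.List.pyGetD pre ((n : Int) - i - 1) 0)]))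
      ([PySem.List.pyGetD pre 0 0], [PySem.List.pyGetD pre (-1) 0])
    = ((List.range (m + 1)).map (pvLA (fun k => pre.getD k 0)),
       (List.range (m + 1)).map (pvLA (fun j => pre.getD (n - 1 - j) 0))) := by
  subst hn
  have hpre_ne : pre ≠ [] := by
    intro h; subst h; simp at h1
  intro m
  induction m with
  | zero =>
    intro _
    rw [show (1 : Int) + ((0 : Nat) : Int) = 1 by norm_num,
      PySem.List.pyRange_one_eq_nil (by omega)]
    have hlast : PySem.List.pyGetD pre (-1) 0 = pre.getD (pre.length - 1) 0 := by
      rw [PySem.List.pyGetD_neg_ofNat pre 1 0 (by omega) (by omega),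
        List.getD_eq_getElem pre 0 (by omega)]
    simp [List.range_one, pvLA, PySem.List.pyGetD_zero, hlast]
  | succ m ih =>
    intro hm
    rw [show (1 : Int) + ((m + 1 : Nat) : Int) = (1 + (m : Nat) : Int) + 1 by push_cast; ring,
      PySem.List.pyRange_one_succ_right (by omega), List.foldl_append, ih (by omega)]
    simp only [List.foldl_cons, List.foldl_nil]
    rw [pyGetD_map_range_neg_one, pyGetD_map_range_neg_one]
    rw [show ((1 : Int) + (m : Nat)) = ((m + 1 : Nat) : Int) by push_cast; ring,
      PySem.List.pyGetD_natCast]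
    rw [show ((pre.length : Int) - ((m + 1 : Nat) : Int) - 1) = ((pre.length - 1 - (m + 1) : Nat) : Int) by push_cast; omega,
      PySem.List.pyGetD_natCast]
    have hr : List.range (m + 1 + 1) = List.range (m + 1) ++ [m + 1] := List.range_succ
    simp only [hr, List.map_append, List.map_singleton, pvLA]

-- the target value: max over all k < n of f k - |k - c|  (both programs compute this per cell)
def pvTrue (f : Nat → Int) (n c : Nat) : Int :=
  pvRM (fun k => f k - |(k : Int) - (c : Int)|) (n - 1)

theorem pvTrue_lipschitz (f : Nat → Int) (n x c : Nat) (_hx : x < n) :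
    pvTrue f n x - |(x : Int) - (c : Int)| ≤ pvTrue f n c := by
  obtain ⟨k, hk, hEq⟩ := pvRM_exists (fun k => f k - |(k : Int) - (x : Int)|) (n - 1)
  have h2 := le_pvRM (fun k => f k - |(k : Int) - (c : Int)|) hk
  have htri := abs_sub_le ((k : Int)) ((x : Int)) ((c : Int))
  simp only at hEq h2
  unfold pvTrue
  rw [hEq]
  omega

theorem le_pvTrue (f : Nat → Int) (n c : Nat) (hc : c < n) : f c ≤ pvTrue f n c := by
  have h := le_pvRM (fun k => f k - |(k : Int) - (c : Int)|) (show c ≤ n - 1 by omega)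
  simp only [sub_self, abs_zero, sub_zero] at h
  exact h

-- loop invariant: lengths, upper bound by the target, lower bound within window d
def pvInv (f : Nat → Int) (n : Nat) (best : List Int) (d : Nat) : Prop :=
  best.length = n ∧
  (∀ c, c < n → best.getD c 0 ≤ pvTrue f n c) ∧
  (∀ k c, k < n → c < n → |(k : Int) - (c : Int)| < (d : Int) →
    f k - |(k : Int) - (c : Int)| ≤ best.getD c 0)

theorem pvRelax_length (best : List Int) (d n : Nat) (hlen : best.length = n)
    (hd : 1 ≤ d) (hdn : d < n) : (pvRelax best d n).length = n := by
  simp only [pvRelax, List.length_append, List.length_take, List.length_zipWith,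
    List.length_drop, List.length_map]
  omega

theorem pvRelax_getD (best : List Int) (d n c : Nat) (hlen : best.length = n)
    (hd : 1 ≤ d) (hdn : d < n) (hc : c < n) :
    (pvRelax best d n).getD c 0 =
      max (if d ≤ c then (best.getD (c - d) 0 - (d : Int)) else best.getD c 0)
        (if c + d < n then max (best.getD c 0) (best.getD (c + d) 0 - (d : Int))
         else best.getD c 0) := by
  have hb2len : (List.zipWith max (best.take (n - d)) ((best.map (fun b => b - (d : Int))).drop d)
      ++ best.drop (n - d)).length = n := by
    simp only [List.length_append, List.length_zipWith, List.length_take, List.length_drop,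
      List.length_map]
    omega
  have hb2 : ∀ x, x < n →
      (List.zipWith max (best.take (n - d)) ((best.map (fun b => b - (d : Int))).drop d)
        ++ best.drop (n - d)).getD x 0
      = if x + d < n then max (best.getD x 0) (best.getD (x + d) 0 - (d : Int))
        else best.getD x 0 := by
    intro x hx
    rw [List.getD_eq_getElem _ _ (by omega)]
    by_cases hxd : x + d < n
    · rw [List.getElem_append_left (by
        simp only [List.length_zipWith, List.length_take, List.length_drop, List.length_map]
        omega)]
      rw [List.getElem_zipWith, List.getElem_take, List.getElem_drop, List.getElem_map]
      rw [if_pos hxd, List.getD_eq_getElem _ _ (by omega), List.getD_eq_getElem _ _ (by omega)]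
      simp only [Nat.add_comm d x]
    · rw [List.getElem_append_right (by
        simp only [List.length_zipWith, List.length_take, List.length_drop, List.length_map]
        omega)]
      rw [if_neg hxd, List.getElem_drop, List.getD_eq_getElem _ _ (by omega)]
      congr 1
      simp only [List.length_zipWith, List.length_take, List.length_drop, List.length_map]
      omega
  show ((List.zipWith max (best.take (n - d)) ((best.map (fun b => b - (d : Int))).drop d)
      ++ best.drop (n - d)).take d
    ++ List.zipWith max ((List.zipWith max (best.take (n - d))
        ((best.map (fun b => b - (d : Int))).drop d) ++ best.drop (n - d)).drop d)
      ((best.map (fun b => b - (d : Int))).take (n - d))).getD c 0 = _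
  rw [List.getD_eq_getElem _ _ (by
    simp only [List.length_append, List.length_take, List.length_zipWith, List.length_drop,
      List.length_map, hb2len]
    omega)]
  by_cases hcd : d ≤ c
  · rw [List.getElem_append_right (by simp only [List.length_take, hb2len]; omega)]
    rw [List.getElem_zipWith, List.getElem_drop, List.getElem_take, List.getElem_map]
    simp only [List.length_take, hb2len, show min d n = d from by omega,
      show d + (c - d) = c from by omega]
    have h' := hb2 c hc
    rw [List.getD_eq_getElem _ _ (by omega)] at h'
    rw [h', if_pos hcd,
      List.getD_eq_getElem best 0 (show c - d < best.length from by omega)]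
    exact max_comm _ _
  · rw [List.getElem_append_left (by simp only [List.length_take, hb2len]; omega)]
    rw [List.getElem_take]
    have h' := hb2 c hc
    rw [List.getD_eq_getElem _ _ (by omega)] at h'
    rw [h', if_neg hcd]
    split_ifs <;> omega

theorem pvRelax_inv (f : Nat → Int) (n : Nat) (best : List Int) (d : Nat)
    (hinv : pvInv f n best d) (hd : 1 ≤ d) (hdn : d < n) :
    pvInv f n (pvRelax best d n) (2 * d) := by
  obtain ⟨hlen, hub, hlb⟩ := hinv
  refine ⟨pvRelax_length best d n hlen hd hdn, ?_, ?_⟩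
  · intro c hc
    rw [pvRelax_getD best d n c hlen hd hdn hc]
    have h0 := hub c hc
    have hmain : ∀ x, x < n → |(x : Int) - (c : Int)| = (d : Int) →
        best.getD x 0 - (d : Int) ≤ pvTrue f n c := by
      intro x hx habs
      have h1 := hub x hx
      have h2 := pvTrue_lipschitz f n x c hx
      omega
    have hR : c + d < n → best.getD (c + d) 0 - (d : Int) ≤ pvTrue f n c := by
      intro h
      exact hmain (c + d) h (by push_cast; rw [abs_of_nonneg (by omega)]; omega)
    have hL : d ≤ c → best.getD (c - d) 0 - (d : Int) ≤ pvTrue f n c := by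
      intro h
      exact hmain (c - d) (by omega) (by rw [abs_of_nonpos (by omega)]; omega)
    split_ifs with h1 h2 h3 <;> simp only [max_le_iff] <;>
      first
      | exact ⟨hL h1, h0, hR h2⟩
      | exact ⟨hL h1, h0⟩
      | exact ⟨h0, h0, hR h3⟩
      | exact ⟨h0, h0⟩
  · intro k c hk hc habs
    rw [pvRelax_getD best d n c hlen hd hdn hc]
    by_cases h1 : |(k : Int) - (c : Int)| < (d : Int)
    · have hb := hlb k c hk hc h1
      split_ifs <;> omega
    · by_cases h2 : c ≤ k
      · -- k ≥ c + d : reach it through best[c + d]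
        have habs' : |(k : Int) - (c : Int)| = (k : Int) - (c : Int) :=
          abs_of_nonneg (by omega)
        rw [habs'] at h1 habs ⊢
        have hcdn : c + d < n := by omega
        have habs2 : |(k : Int) - ((c + d : Nat) : Int)| = (k : Int) - (c : Int) - (d : Int) := by
          push_cast
          rw [abs_of_nonneg (by omega)]
          ring
        have hb := hlb k (c + d) hk hcdn (by rw [habs2]; omega)
        rw [habs2] at hb
        split_ifs <;> omega
      · -- k ≤ c - d : reach it through best[c - d]
        have habs' : |(k : Int) - (c : Int)| = (c : Int) - (k : Int) := by
          rw [abs_of_nonpos (by omega)]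
          ring
        rw [habs'] at h1 habs ⊢
        have hdc : d ≤ c := by omega
        have habs2 : |(k : Int) - ((c - d : Nat) : Int)| = (c : Int) - (k : Int) - (d : Int) := by
          rw [show ((c - d : Nat) : Int) = (c : Int) - (d : Int) by omega]
          rw [abs_of_nonpos (by omega)]
          ring
        have hb := hlb k (c - d) hk (by omega) (by rw [habs2]; omega)
        rw [habs2] at hb
        split_ifs <;> omega

theorem pvInv_final (f : Nat → Int) (n : Nat) (best : List Int) (d : Nat)
    (hinv : pvInv f n best d) (h1 : 1 ≤ n) (hnd : n ≤ d) :
    ∀ c, c < n → best.getD c 0 = pvTrue f n c := by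
  obtain ⟨hlen, hub, hlb⟩ := hinv
  intro c hc
  refine le_antisymm (hub c hc) ?_
  obtain ⟨k, hk, hEq⟩ := pvRM_exists (fun k => f k - |(k : Int) - (c : Int)|) (n - 1)
  have hb := hlb k c (by omega) hc (by
    have h2 : |(k : Int) - (c : Int)| ≤ (n : Int) - 1 := by
      rcases abs_cases ((k : Int) - (c : Int)) with ⟨h, _⟩ | ⟨h, _⟩ <;> omega
    omega)
  unfold pvTrue
  simp only at hEq hb
  omega

theorem pvInv_init (pre : List Int) (n : Nat) (hlen : pre.length = n) (_h1 : 1 ≤ n) :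
    pvInv (fun k => pre.getD k 0) n pre 1 := by
  refine ⟨hlen, fun c hc => le_pvTrue _ n c hc, ?_⟩
  intro k c hk hc habs
  have : k = c := by
    rcases abs_cases ((k : Int) - (c : Int)) with ⟨h, _⟩ | ⟨h, _⟩ <;> omega
  subst this
  simp

theorem pvLoop_spec (f : Nat → Int) (n : Nat) (h1 : 1 ≤ n) :
    ∀ gas dm best, n - dm ≤ gas → pvInv f n best (dm + 1) →
    (pvLoop best dm n).length = n ∧
    ∀ c, c < n → (pvLoop best dm n).getD c 0 = pvTrue f n c := by
  intro gas
  induction gas with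
  | zero =>
    intro dm best hgas hinv
    rw [pvLoop, if_neg (by omega)]
    exact ⟨hinv.1, pvInv_final f n best (dm + 1) hinv h1 (by omega)⟩
  | succ gas ih =>
    intro dm best hgas hinv
    by_cases h : dm + 1 < n
    · rw [pvLoop, if_pos h]
      refine ih (2 * dm + 1) _ (by omega) ?_
      have := pvRelax_inv f n best (dm + 1) hinv (by omega) h
      rwa [show 2 * (dm + 1) = 2 * dm + 1 + 1 by ring] at this
    · rw [pvLoop, if_neg h]
      exact ⟨hinv.1, pvInv_final f n best (dm + 1) hinv h1 (by omega)⟩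

-- B's zip-add row as a map over column indices
theorem zipWith_add_eq_map_range (prow relaxed : List Int) (n : Nat)
    (hr : relaxed.length = n) (hp : n ≤ prow.length) :
    List.zipWith (fun p b => p + b) prow relaxed
      = (List.range n).map (fun c => prow.getD c 0 + relaxed.getD c 0) := by
  apply List.ext_getElem (by simp; omega)
  intro i hi1 hi2
  simp only [List.getElem_zipWith, List.getElem_map, List.getElem_range]
  rw [List.getD_eq_getElem _ _ (by simp at hi1; omega),
    List.getD_eq_getElem _ _ (by simp at hi1; omega)]

-- one row of B equals the target row
theorem pvRowB (pre prow : List Int) (n : Nat) (hn : pre.length = n) (h1 : 1 ≤ n)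
    (hp : n ≤ prow.length) :
    List.zipWith (fun p b => p + b) prow (pvLoop pre 0 n)
      = (List.range n).map (fun c => prow.getD c 0 + pvTrue (fun k => pre.getD k 0) n c) := by
  obtain ⟨hlen, hval⟩ := pvLoop_spec (fun k => pre.getD k 0) n h1 n 0 pre (by omega)
    (pvInv_init pre n hn h1)
  rw [zipWith_add_eq_map_range prow _ n hlen hp]
  exact List.map_congr_left (fun c hc => by rw [hval c (List.mem_range.mp hc)])

-- one row of A equals the target row
theorem pvRowA (pre prow : List Int) (n : Nat) (hn : pre.length = n) (h1 : 1 ≤ n) :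
    ((PySem.List.pyRange 0 (n : Int) 1).map (fun col =>
        max (PySem.List.pyGetD ((PySem.List.pyRange 1 (n : Int) 1).foldl
              (fun (p : List Int × List Int) i =>
                (p.1 ++ [max (PySem.List.pyGetD p.1 (-1) 0 - 1) (PySem.List.pyGetD pre i 0)],
                 p.2 ++ [max (PySem.List.pyGetD p.2 (-1) 0 - 1) (PySem.List.pyGetD pre ((n : Int) - i - 1) 0)]))
              ([PySem.List.pyGetD pre 0 0], [PySem.List.pyGetD pre (-1) 0])).1 col 0)
            (PySem.List.pyGetD ((PySem.List.pyRange 1 (n : Int) 1).foldl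
              (fun (p : List Int × List Int) i =>
                (p.1 ++ [max (PySem.List.pyGetD p.1 (-1) 0 - 1) (PySem.List.pyGetD pre i 0)],
                 p.2 ++ [max (PySem.List.pyGetD p.2 (-1) 0 - 1) (PySem.List.pyGetD pre ((n : Int) - i - 1) 0)]))
              ([PySem.List.pyGetD pre 0 0], [PySem.List.pyGetD pre (-1) 0])).2.reverse col 0)
          + PySem.List.pyGetD prow col 0))
    = (List.range n).map (fun c => prow.getD c 0 + pvTrue (fun k => pre.getD k 0) n c) := by
  have hfold := pvInner pre n hn h1 (n - 1) le_rfl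
  rw [show ((1 : Int) + ((n - 1 : Nat) : Int)) = (n : Int) by omega] at hfold
  rw [show n - 1 + 1 = n by omega] at hfold
  rw [hfold, PySem.List.pyRange_zero_natCast, List.map_map]
  refine List.map_congr_left (fun c hc => ?_)
  rw [List.mem_range] at hc
  simp only [Function.comp_apply, PySem.List.pyGetD_natCast]
  rw [getD_map_range_of_lt _ hc, getD_reverse_map_range _ hc]
  unfold pvTrue
  rw [pvMaxSplit (fun k => pre.getD k 0) n c h1 hc,
    pvLA_eq_RM (fun k => pre.getD k 0) c,
    pvLA_right pre n (n - 1 - c) h1 (by omega),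
    show n - 1 - (n - 1 - c) = c by omega]
  ring

-- the whole outer loop
theorem pvOuter (n : Nat) (h1 : 1 ≤ n) (rest : List (List Int))
    (hrows : ∀ r ∈ rest, n ≤ r.length) :
    ∀ pre : List Int, pre.length = n →
    rest.foldl (fun pre prow =>
      (PySem.List.pyRange 0 (n : Int) 1).map (fun col =>
        max (PySem.List.pyGetD ((PySem.List.pyRange 1 (n : Int) 1).foldl
              (fun (p : List Int × List Int) i =>
                (p.1 ++ [max (PySem.List.pyGetD p.1 (-1) 0 - 1) (PySem.List.pyGetD pre i 0)],
                 p.2 ++ [max (PySem.List.pyGetD p.2 (-1) 0 - 1) (PySem.List.pyGetD pre ((n : Int) - i - 1) 0)]))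
              ([PySem.List.pyGetD pre 0 0], [PySem.List.pyGetD pre (-1) 0])).1 col 0)
            (PySem.List.pyGetD ((PySem.List.pyRange 1 (n : Int) 1).foldl
              (fun (p : List Int × List Int) i =>
                (p.1 ++ [max (PySem.List.pyGetD p.1 (-1) 0 - 1) (PySem.List.pyGetD pre i 0)],
                 p.2 ++ [max (PySem.List.pyGetD p.2 (-1) 0 - 1) (PySem.List.pyGetD pre ((n : Int) - i - 1) 0)]))
              ([PySem.List.pyGetD pre 0 0], [PySem.List.pyGetD pre (-1) 0])).2.reverse col 0)
          + PySem.List.pyGetD prow col 0)) pre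
    = rest.foldl (fun best rw =>
        List.zipWith (fun p b => p + b) rw (pvLoop best 0 n)) pre := by
  induction rest with
  | nil => intro pre _; rfl
  | cons r rest ih =>
    intro pre hpre
    simp only [List.foldl_cons]
    rw [pvRowA pre r n hpre h1, ← pvRowB pre r n hpre h1 (hrows r (by simp))]
    exact ih (fun r hr => hrows r (by simp [hr])) _ (by
      rw [pvRowB pre r n hpre h1 (hrows r (by simp))]; simp)

-- ===== VERDICT (by name: the statement is the Claim_ definition above) =====
theorem maxPoints_v2_spec : Claim_equal_maxPoints_v2 := by
  intro points _ hpre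
  obtain ⟨hne, hhead, hrows⟩ := hpre
  obtain ⟨p, rest, rfl⟩ := List.exists_cons_of_ne_nil hne
  have hn : 1 ≤ p.length := by
    have : p ≠ [] := by simpa using hhead
    have := List.length_pos_of_ne_nil this
    omega
  unfold Spec_maxPoints_v2 maxPoints_v2 maxPoints_v2_alt
  simp only [PySem.List.pyGetD_zero_cons, List.headI_cons, List.drop_one, List.tail_cons]
  rw [PySem.List.foldl_pyRange_pyGetD' (p :: rest) ([] : List Int)
    (fun pre prow =>
      (PySem.List.pyRange 0 ((p.length : Int)) 1).map (fun col =>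
        max (PySem.List.pyGetD ((PySem.List.pyRange 1 ((p.length : Int)) 1).foldl
              (fun (q : List Int × List Int) i =>
                (q.1 ++ [max (PySem.List.pyGetD q.1 (-1) 0 - 1) (PySem.List.pyGetD pre i 0)],
                 q.2 ++ [max (PySem.List.pyGetD q.2 (-1) 0 - 1) (PySem.List.pyGetD pre ((p.length : Int) - i - 1) 0)]))
              ([PySem.List.pyGetD pre 0 0], [PySem.List.pyGetD pre (-1) 0])).1 col 0)
            (PySem.List.pyGetD ((PySem.List.pyRange 1 ((p.length : Int)) 1).foldl
              (fun (q : List Int × List Int) i =>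
                (q.1 ++ [max (PySem.List.pyGetD q.1 (-1) 0 - 1) (PySem.List.pyGetD pre i 0)],
                 q.2 ++ [max (PySem.List.pyGetD q.2 (-1) 0 - 1) (PySem.List.pyGetD pre ((p.length : Int) - i - 1) 0)]))
              ([PySem.List.pyGetD pre 0 0], [PySem.List.pyGetD pre (-1) 0])).2.reverse col 0)
          + PySem.List.pyGetD prow col 0)) p (a := 1) (by norm_num)]
  simp only [Int.toNat_one, List.drop_one, List.tail_cons]
  refine congrArg pyMax (pvOuter p.length hn rest ?_ p rfl)
  intro r hr
  exact hrows r (by simp [hr])
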